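-- pv_equiv track=rewrite | github.com/healthonrails/annolid | annolid/core/models/adapters/dino_kpseg_adapter.py | _canonical_keypoint_name
-- ===== SOURCE A (Python) =====
-- def _canonical_keypoint_name(name: str) -> str:
--     candidate = str(name or "").strip()
--     if not candidate:
--         return ""
--     for sep in (":", "/", "\\", "|"):
--         if sep in candidate:
--             candidate = candidate.split(sep)[-1].strip()
--     return candidate
-- ===== SOURCE B (Python) =====
-- def _canonical_keypoint_name(name: str) -> str:
--     candidate = str(name or "").strip()
--     # single reverse scan for the rightmost separator instead of sequential splits
--     for i in range(len(candidate) - 1, -1, -1):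
--         if candidate[i] in ":/\\|":
--             return candidate[i + 1:].strip()
--     return candidate
-- ===== Notes on version B (the rewrite author's own statement) =====
-- stated objective: simpler
-- what changed: Instead of four sequential split-on-separator passes with re-stripping, B makes a single right-to-left scan for the rightmost separator character and strips the suffix after it once.
import Mathlib
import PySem

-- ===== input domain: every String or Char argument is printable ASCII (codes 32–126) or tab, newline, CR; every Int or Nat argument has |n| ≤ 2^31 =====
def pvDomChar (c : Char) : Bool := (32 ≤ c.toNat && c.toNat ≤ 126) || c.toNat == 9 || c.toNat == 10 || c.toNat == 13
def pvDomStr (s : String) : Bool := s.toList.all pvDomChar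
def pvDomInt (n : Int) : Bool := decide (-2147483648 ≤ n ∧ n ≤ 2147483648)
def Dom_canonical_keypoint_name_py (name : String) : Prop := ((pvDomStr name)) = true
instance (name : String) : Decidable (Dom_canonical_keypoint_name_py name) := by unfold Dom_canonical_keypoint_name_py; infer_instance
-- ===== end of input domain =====

-- B replaces A's four sequential split-on-separator passes by one right-to-left scan for the
-- rightmost separator, stripping the suffix after it once (objective: simpler).

-- ===== PORT A =====
-- A's loop body: `if sep in candidate: candidate = candidate.split(sep)[-1].strip()`
def pvStepA (cand : List Char) (sep : List Char) : List Char :=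
  if PySem.Chars.isIn sep cand
  then PySem.Chars.strip ((PySem.Chars.splitOn cand sep).getLastD [])  -- split(sep)[-1]; split never returns []
  else cand

def canonical_keypoint_name_py (name : String) : String :=
  -- candidate = str(name or "").strip()
  let candidate := PySem.Chars.strip (if name == "" then "" else name).toList
  if candidate.isEmpty then ""
  else String.ofList (List.foldl pvStepA candidate [[':'], ['/'], ['\\'], ['|']])

-- ===== PORT B =====
def pySepB (c : Char) : Bool := c == ':' || c == '/' || c == '\\' || c == '|'   -- candidate[i] in ":/\\|"

-- the loop `for i in range(len(candidate)-1, -1, -1)`: scan right-to-left, acc = candidate[i+1:]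
def pvAltGo : List Char → List Char → List Char
  | [], acc => acc
  | c :: rs, acc => if pySepB c then PySem.Chars.strip acc else pvAltGo rs (c :: acc)

def canonical_keypoint_name_py_alt (name : String) : String :=
  let candidate := PySem.Chars.strip (if name == "" then "" else name).toList
  String.ofList (pvAltGo candidate.reverse [])

-- ===== PRECONDITION & SPEC =====
def Spec_canonical_keypoint_name_py (name : String) (out : String) : Prop := out = canonical_keypoint_name_py_alt name
instance (name : String) (out : String) : Decidable (Spec_canonical_keypoint_name_py name out) := by unfold Spec_canonical_keypoint_name_py; infer_instance

-- ===== CLAIM (what is proved, stated in full; the proofs are below) =====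
def Claim_equal_canonical_keypoint_name_py : Prop := ∀ (name : String), Dom_canonical_keypoint_name_py name → Spec_canonical_keypoint_name_py name (canonical_keypoint_name_py name)

-- ===== LEMMAS AND PROOFS =====

theorem pv_takeWhile_and {α : Type} (p q : α → Bool) (l : List α) :
    l.takeWhile (fun a => p a && q a) = (l.takeWhile p).takeWhile q := by
  induction l with
  | nil => rfl
  | cons a l ih =>
    by_cases hp : p a <;> by_cases hq : q a <;> simp [hp, hq, ih]

theorem pv_takeWhile_append_all {α : Type} {p : α → Bool} {l₁ l₂ : List α}
    (h : ∀ a ∈ l₁, p a = true) :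
    (l₁ ++ l₂).takeWhile p = l₁ ++ l₂.takeWhile p := by
  rw [List.takeWhile_append, List.takeWhile_eq_self_iff.mpr h]
  simp

theorem pv_takeWhile_append_stop {α : Type} {p : α → Bool} {l₁ l₂ : List α}
    (h : ∃ a ∈ l₁, p a = false) :
    (l₁ ++ l₂).takeWhile p = l₁.takeWhile p := by
  rw [List.takeWhile_append]
  have hne : ¬ (l₁.takeWhile p).length = l₁.length := by
    intro hlen
    have heq : l₁.takeWhile p = l₁ :=
      (List.takeWhile_prefix p).eq_of_length hlen
    obtain ⟨a, ha, hpa⟩ := h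
    have := List.takeWhile_eq_self_iff.mp heq a ha
    simp [hpa] at this
  simp [hne]

theorem pv_strip_eq (l : List Char) :
    PySem.Chars.strip l = (l.dropWhile PySem.Chars.isspace).rdropWhile PySem.Chars.isspace := rfl

theorem pv_rdropWhile_append_all {α : Type} {p : α → Bool} (l y : List α)
    (h : ∀ a ∈ y, p a = true) :
    (l ++ y).rdropWhile p = l.rdropWhile p := by
  induction y using List.reverseRecOn with
  | nil => simp
  | append_singleton ys a ih =>
    rw [← List.append_assoc, List.rdropWhile_concat_pos p (l ++ ys) a (h a (by simp))]
    exact ih (fun a ha => h a (by simp [ha]))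

theorem pv_dropWhile_rdropWhile_comm {α : Type} (p : α → Bool) (l : List α) :
    (l.rdropWhile p).dropWhile p = (l.dropWhile p).rdropWhile p := by
  by_cases hall : ∀ x ∈ l, p x = true
  · rw [List.rdropWhile_eq_nil_iff.mpr hall, List.dropWhile_eq_nil_iff.mpr hall]
    simp
  · have hdecomp : l.rdropWhile p ++ l.rtakeWhile p = l := List.rdropWhile_append_rtakeWhile
    have hrne : l.rdropWhile p ≠ [] := by
      intro hnil
      exact hall (fun x hx => List.mem_rtakeWhile_imp (by rw [← hdecomp, hnil] at hx; simpa using hx))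
    have hlast : ¬ p ((l.rdropWhile p).getLast hrne) = true := List.rdropWhile_last_not _ _ hrne
    have hnotall : ¬ ∀ x ∈ l.rdropWhile p, p x = true := by
      intro hy
      exact hlast (hy _ (List.getLast_mem hrne))
    have hdropne : (l.rdropWhile p).dropWhile p ≠ [] := by
      intro hnil
      exact hnotall (List.dropWhile_eq_nil_iff.mp hnil)
    have h1 : l.dropWhile p = (l.rdropWhile p).dropWhile p ++ l.rtakeWhile p := by
      conv_lhs => rw [← hdecomp]
      rw [List.dropWhile_append]
      simp [List.isEmpty_iff, hdropne]
    rw [h1, pv_rdropWhile_append_all _ _ (fun a ha => List.mem_rtakeWhile_imp ha)]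
    have hself : ∀ hne : (l.rdropWhile p).dropWhile p ≠ [],
        ¬ p (((l.rdropWhile p).dropWhile p).getLast hne) = true := by
      intro hne
      obtain ⟨t, ht⟩ := List.dropWhile_suffix (l := l.rdropWhile p) p
      have hopt : ((l.rdropWhile p).dropWhile p).getLast? = (l.rdropWhile p).getLast? := by
        conv_rhs => rw [← ht]
        exact (List.getLast?_append_of_ne_nil t hne).symm
      rw [List.getLast?_eq_some_getLast hne, List.getLast?_eq_some_getLast hrne] at hopt
      rw [Option.some.injEq] at hopt
      rw [hopt]
      exact hlast
    exact (List.rdropWhile_eq_self_iff.mpr hself).symm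

theorem pv_strip_reverse (l : List Char) :
    PySem.Chars.strip l.reverse = (PySem.Chars.strip l).reverse := by
  have h1 : l.reverse.dropWhile PySem.Chars.isspace = (l.rdropWhile PySem.Chars.isspace).reverse := by
    simp [List.rdropWhile]
  rw [pv_strip_eq, h1, List.rdropWhile_reverse, pv_strip_eq, pv_dropWhile_rdropWhile_comm]

theorem pv_strip_ws_prefix {w x : List Char} (h : ∀ a ∈ w, PySem.Chars.isspace a = true) :
    PySem.Chars.strip (w ++ x) = PySem.Chars.strip x := by
  rw [pv_strip_eq, pv_strip_eq, List.dropWhile_append, List.dropWhile_eq_nil_iff.mpr h]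
  simp

theorem pv_mem_dropWhile_iff {α : Type} {d : α} {p : α → Bool} (l : List α)
    (hd : p d = false) : d ∈ l.dropWhile p ↔ d ∈ l := by
  constructor
  · intro h
    rw [← List.takeWhile_append_dropWhile (p := p) (l := l)]
    exact List.mem_append_right _ h
  · intro h
    rw [← List.takeWhile_append_dropWhile (p := p) (l := l)] at h
    rcases List.mem_append.mp h with h' | h'
    · exact absurd (List.mem_takeWhile_imp h') (by simp [hd])
    · exact h'

theorem pv_mem_rdropWhile_iff {α : Type} {d : α} {p : α → Bool} (l : List α)
    (hd : p d = false) : d ∈ l.rdropWhile p ↔ d ∈ l := by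
  constructor
  · intro h
    rw [← List.rdropWhile_append_rtakeWhile (p := p) (l := l)]
    exact List.mem_append_left _ h
  · intro h
    rw [← List.rdropWhile_append_rtakeWhile (p := p) (l := l)] at h
    rcases List.mem_append.mp h with h' | h'
    · exact h'
    · exact absurd (List.mem_rtakeWhile_imp h') (by simp [hd])

theorem pv_mem_strip_iff {d : Char} {l : List Char} (hd : PySem.Chars.isspace d = false) :
    d ∈ PySem.Chars.strip l ↔ d ∈ l := by
  rw [pv_strip_eq, pv_mem_rdropWhile_iff _ hd, pv_mem_dropWhile_iff _ hd]

theorem pv_goLast (c : Char) :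
    ∀ (fuel : Nat) (l cur : List Char) (acc : List (List Char)), l.length < fuel →
      (PySem.Chars.splitOn.go [c] fuel l cur acc).getLastD [] =
        if c ∈ l then (l.reverse.takeWhile (fun d => d != c)).reverse
        else cur.reverse ++ l := by
  intro fuel
  induction fuel with
  | zero => intro l cur acc h; omega
  | succ fuel ih =>
    intro l cur acc h
    cases l with
    | nil =>
      simp [PySem.Chars.splitOn.go]
    | cons ch rest =>
      by_cases hc : ch = c
      · subst hc
        have hpre : List.isPrefixOf [ch] (ch :: rest) = true := by
          simp [List.isPrefixOf]
        rw [PySem.Chars.splitOn.go]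
        simp only [hpre, if_true, List.length_cons, List.length_nil, List.drop_succ_cons, List.drop_zero]
        rw [ih rest [] _ (by simpa using Nat.lt_of_succ_lt_succ (by simpa using h))]
        simp only [List.mem_cons, true_or, if_true, List.reverse_cons]
        by_cases hm : ch ∈ rest
        · rw [if_pos hm, pv_takeWhile_append_stop ⟨ch, by simpa using hm, by simp⟩]
        · rw [if_neg hm,
            pv_takeWhile_append_all (fun a ha => by
              simp only [bne_iff_ne, ne_eq]
              intro hEq; exact hm (by simpa [hEq] using List.mem_reverse.mp ha))]
          simp
      · have hpre : List.isPrefixOf [c] (ch :: rest) = false := by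
          simp [List.isPrefixOf]
          exact fun hEq => absurd hEq.symm hc
        rw [PySem.Chars.splitOn.go]
        simp only [hpre, Bool.false_eq_true, if_false]
        rw [ih rest (ch :: cur) acc (by simpa using Nat.lt_of_succ_lt_succ (by simpa using h))]
        have hmem : (c ∈ ch :: rest) ↔ c ∈ rest := by
          simp [List.mem_cons]
          intro hEq; exact absurd hEq.symm hc
        by_cases hm : c ∈ rest
        · rw [if_pos hm, if_pos (hmem.mpr hm)]
          rw [List.reverse_cons,
            pv_takeWhile_append_stop ⟨c, by simpa using hm, by simp⟩]
        · rw [if_neg hm, if_neg (fun hx => hm (hmem.mp hx))]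
          simp

theorem pv_stepA_char (c : Char) (cs : List Char) :
    pvStepA cs [c] =
      if c ∈ cs then PySem.Chars.strip ((cs.reverse.takeWhile (fun d => d != c)).reverse)
      else cs := by
  unfold pvStepA
  by_cases hm : c ∈ cs
  · have hin : PySem.Chars.isIn [c] cs = true :=
      (PySem.Chars.isIn_iff_infix _ _).mpr ((List.singleton_infix_iff _ _).mpr hm)
    rw [hin, if_pos rfl, if_pos hm]
    have := pv_goLast c (cs.length + 1) cs [] [] (by omega)
    rw [if_pos hm] at this
    show PySem.Chars.strip ((PySem.Chars.splitOn.go [c] (cs.length + 1) cs [] []).getLastD []) = _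
    rw [this]
  · have hin : PySem.Chars.isIn [c] cs = false := by
      rcases hb : PySem.Chars.isIn [c] cs with _ | _
      · rfl
      · exact absurd ((List.singleton_infix_iff _ _).mp ((PySem.Chars.isIn_iff_infix _ _).mp hb)) hm
    rw [hin, if_neg hm]
    simp

theorem pv_core (q : Char → Bool) (v : List Char)
    (hq : ∀ d, q d = false → PySem.Chars.isspace d = false)
    (hex : ∃ d ∈ v, q d = false) :
    PySem.Chars.strip ((PySem.Chars.strip v).takeWhile q) =
      PySem.Chars.strip (v.takeWhile q) := by
  obtain ⟨d0, hd0v, hd0q⟩ := hex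
  have hd0w : PySem.Chars.isspace d0 = false := hq d0 hd0q
  have hva : v.takeWhile PySem.Chars.isspace ++ v.dropWhile PySem.Chars.isspace = v :=
    List.takeWhile_append_dropWhile
  set a := v.takeWhile PySem.Chars.isspace with ha
  set m := v.dropWhile PySem.Chars.isspace with hmdef
  have haws : ∀ x ∈ a, PySem.Chars.isspace x = true := fun x hx => List.mem_takeWhile_imp hx
  have haq : ∀ x ∈ a, q x = true := by
    intro x hx
    rcases hqx : q x with _ | _
    · exact absurd (haws x hx) (by simp [hq x hqx])
    · rfl
  -- right side
  have hR : v.takeWhile q = a ++ m.takeWhile q := by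
    conv_lhs => rw [← hva]
    exact pv_takeWhile_append_all haq
  have hstripR : PySem.Chars.strip (v.takeWhile q) = PySem.Chars.strip (m.takeWhile q) := by
    rw [hR]; exact pv_strip_ws_prefix haws
  -- strip v = rdropWhile ws m
  have hSV : PySem.Chars.strip v = m.rdropWhile PySem.Chars.isspace := pv_strip_eq v
  -- d0 lives in rdropWhile ws m
  have hd0m : d0 ∈ m := by
    rw [← pv_mem_dropWhile_iff (p := PySem.Chars.isspace) v hd0w] at hd0v
    exact hd0v
  have hd0r : d0 ∈ m.rdropWhile PySem.Chars.isspace :=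
    (pv_mem_rdropWhile_iff _ hd0w).mpr hd0m
  -- takeWhile q m = takeWhile q (rdropWhile ws m)
  have hM : m.takeWhile q = (m.rdropWhile PySem.Chars.isspace).takeWhile q := by
    conv_lhs => rw [← List.rdropWhile_append_rtakeWhile (p := PySem.Chars.isspace) (l := m)]
    exact pv_takeWhile_append_stop ⟨d0, hd0r, hd0q⟩
  rw [hstripR, hSV, hM]

theorem pv_foldA (L : List Char) (hL : ∀ c ∈ L, PySem.Chars.isspace c = false) :
    ∀ cs : List Char,
      List.foldl pvStepA cs (L.map (fun c => [c])) =
        if cs.any (fun d => L.contains d) then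
          PySem.Chars.strip ((cs.reverse.takeWhile (fun d => !L.contains d)).reverse)
        else cs := by
  induction L with
  | nil => intro cs; simp
  | cons c L' ih =>
    have hcw : PySem.Chars.isspace c = false := hL c (by simp)
    have hL' : ∀ c' ∈ L', PySem.Chars.isspace c' = false := fun c' hc' => hL c' (by simp [hc'])
    intro cs
    rw [List.map_cons, List.foldl_cons, pv_stepA_char]
    have hpred : (fun d => !(c :: L').contains d) = fun d => (d != c) && !L'.contains d := by
      funext d
      by_cases hdc : d = c <;> simp [hdc]
    by_cases hm : c ∈ cs
    · -- the step fires; set t / u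
      rw [if_pos hm]
      set t := cs.reverse.takeWhile (fun d => d != c) with htdef
      have hcond : cs.any (fun d => (c :: L').contains d) = true := by
        simp only [List.any_eq_true]
        exact ⟨c, hm, by simp⟩
      rw [hcond, if_pos rfl, hpred, pv_takeWhile_and, ← htdef]
      rw [ih hL' (PySem.Chars.strip t.reverse)]
      by_cases hex : ∃ d ∈ t, L'.contains d = true
      · obtain ⟨d0, hd0t, hd0L⟩ := hex
        have hd0w : PySem.Chars.isspace d0 = false := hL' d0 (List.contains_iff_mem.mp hd0L)
        have hd0s : d0 ∈ PySem.Chars.strip t.reverse :=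
          (pv_mem_strip_iff hd0w).mpr (List.mem_reverse.mpr hd0t)
        have hcond' : (PySem.Chars.strip t.reverse).any (fun d => L'.contains d) = true := by
          simp only [List.any_eq_true]
          exact ⟨d0, hd0s, hd0L⟩
        rw [hcond', if_pos rfl]
        have hrev : (PySem.Chars.strip t.reverse).reverse = PySem.Chars.strip t := by
          rw [← pv_strip_reverse, List.reverse_reverse]
        rw [hrev]
        have hcore := pv_core (fun d => !L'.contains d) t
          (by intro d hd; simp only [Bool.not_eq_false'] at hd
              exact hL' d (List.contains_iff_mem.mp hd))
          ⟨d0, hd0t, by simpa using hd0L⟩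
        rw [pv_strip_reverse, pv_strip_reverse, hcore]
      · have hnone : ∀ d ∈ t, L'.contains d = false := by
          intro d hd
          rcases hb : L'.contains d with _ | _
          · rfl
          · exact absurd ⟨d, hd, hb⟩ hex
        have hcond' : (PySem.Chars.strip t.reverse).any (fun d => L'.contains d) = false := by
          rcases hb : (PySem.Chars.strip t.reverse).any (fun d => L'.contains d) with _ | _
          · rfl
          · obtain ⟨d, hds, hdL⟩ := List.any_eq_true.mp hb
            have hdw : PySem.Chars.isspace d = false := hL' d (List.contains_iff_mem.mp hdL)
            have : d ∈ t := List.mem_reverse.mp ((pv_mem_strip_iff hdw).mp hds)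
            rw [hnone d this] at hdL
            exact absurd hdL (by simp)
        rw [hcond']
        simp only [Bool.false_eq_true, if_false]
        have : t.takeWhile (fun d => !L'.contains d) = t :=
          List.takeWhile_eq_self_iff.mpr (fun x hx => by simpa using hnone x hx)
        rw [this]
    · -- c not present: the step is the identity
      rw [if_neg hm, ih hL' cs]
      have hcond : cs.any (fun d => (c :: L').contains d) = cs.any (fun d => L'.contains d) := by
        rw [Bool.eq_iff_iff]
        simp only [List.any_eq_true]
        constructor
        · rintro ⟨d, hd, hdL⟩
          rcases (by simpa [List.contains_cons] using hdL : d = c ∨ L'.contains d = true) with hEq | h'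
          · exact absurd (hEq ▸ hd) hm
          · exact ⟨d, hd, h'⟩
        · rintro ⟨d, hd, hdL⟩
          exact ⟨d, hd, by simp only [List.contains_cons, Bool.or_eq_true]; exact Or.inr hdL⟩
      have htw : cs.reverse.takeWhile (fun d => !(c :: L').contains d) =
          cs.reverse.takeWhile (fun d => !L'.contains d) := by
        rw [hpred, pv_takeWhile_and]
        have hall : cs.reverse.takeWhile (fun d => d != c) = cs.reverse :=
          List.takeWhile_eq_self_iff.mpr (fun x hx => by
            simp only [bne_iff_ne, ne_eq]
            intro hEq
            exact hm (hEq ▸ List.mem_reverse.mp hx))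
        rw [hall]
      rw [hcond, htw]

theorem pv_altGo_spec : ∀ (rs acc : List Char),
    pvAltGo rs acc =
      if rs.any pySepB then
        PySem.Chars.strip ((rs.takeWhile (fun c => !pySepB c)).reverse ++ acc)
      else rs.reverse ++ acc := by
  intro rs
  induction rs with
  | nil => intro acc; simp [pvAltGo]
  | cons c rs ih =>
    intro acc
    by_cases hc : pySepB c = true
    · simp [pvAltGo, hc]
    · have hc' : pySepB c = false := by simpa using hc
      rw [pvAltGo, hc', if_neg (by simp), ih (c :: acc)]
      simp only [List.any_cons, hc', Bool.false_or, List.takeWhile_cons, Bool.not_false,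
        if_true, List.reverse_cons]
      by_cases hany : rs.any pySepB = true
      · rw [hany, if_pos rfl]
        simp [List.append_assoc]
      · have : rs.any pySepB = false := by simpa using hany
        rw [this]
        simp [List.append_assoc]

theorem pv_sep_bridge : ∀ d : Char, ([':', '/', '\\', '|'] : List Char).contains d = pySepB d := by
  intro d
  by_cases h1 : d = ':' <;> by_cases h2 : d = '/' <;> by_cases h3 : d = '\\' <;>
    by_cases h4 : d = '|' <;> simp [pySepB, h1, h2, h3, h4]

theorem pv_main (cs : List Char) :
    List.foldl pvStepA cs [[':'], ['/'], ['\\'], ['|']] = pvAltGo cs.reverse [] := by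
  have hL : ∀ c ∈ ([':', '/', '\\', '|'] : List Char), PySem.Chars.isspace c = false := by
    intro c hc
    simp only [List.mem_cons, List.not_mem_nil, or_false] at hc
    rcases hc with rfl | rfl | rfl | rfl <;> rfl
  have hA := pv_foldA [':', '/', '\\', '|'] hL cs
  have hmap : (([':', '/', '\\', '|'] : List Char).map (fun c => [c])) =
      ([[':'], ['/'], ['\\'], ['|']] : List (List Char)) := rfl
  rw [hmap] at hA
  rw [hA, pv_altGo_spec cs.reverse []]
  simp only [List.any_reverse, List.append_nil, List.reverse_reverse]
  have hfun : (fun d => ([':', '/', '\\', '|'] : List Char).contains d) = pySepB := by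
    funext d; exact pv_sep_bridge d
  have hfun' : (fun d => !([':', '/', '\\', '|'] : List Char).contains d) =
      (fun c => !pySepB c) := by
    funext d; rw [pv_sep_bridge d]
  rw [hfun, hfun']

-- ===== VERDICT (by name: the statement is the Claim_ definition above) =====
theorem canonical_keypoint_name_py_spec : Claim_equal_canonical_keypoint_name_py := by
  intro name _
  unfold Spec_canonical_keypoint_name_py canonical_keypoint_name_py canonical_keypoint_name_py_alt
  set cs := PySem.Chars.strip (if name == "" then "" else name).toList with hcs
  by_cases h : cs.isEmpty
  · rw [if_pos h]
    rw [List.isEmpty_iff.mp h]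
    rfl
  · rw [if_neg h, pv_main]
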